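-- pv_equiv track=rewrite | github.com/sinclairpan-git/Ai_AutoSDLC | src/ai_sdlc/telemetry/display.py | summarize_truth_ledger_explain_for_display
-- ===== SOURCE A (Python) =====
-- from typing import Any
--
-- def _dedupe_display_text_items(values: object) -> list[str]:
--     deduped: list[str] = []
--     for value in values or []:
--         normalized = " ".join(str(value).split())
--         if normalized and normalized not in deduped:
--             deduped.append(normalized)
--     return deduped
--
-- def summarize_truth_ledger_explain_for_display(
--     release_capabilities: list[dict[str, Any]],
-- ) -> str:
--     sample_explanations: list[str] = []
--     for item in release_capabilities:
--         for explanation in _dedupe_display_text_items(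
--             item.get("plain_language_blockers", [])
--         ):
--             if explanation in sample_explanations:
--                 continue
--             sample_explanations.append(explanation)
--             if len(sample_explanations) >= 3:
--                 return "; ".join(sample_explanations)
--     return "; ".join(sample_explanations)
-- ===== SOURCE B (Python) =====
-- def summarize_truth_ledger_explain_for_display(release_capabilities):
--     texts = [
--         normalized
--         for item in release_capabilities
--         for value in item.get("plain_language_blockers", [])
--         if (normalized := " ".join(str(value).split()))
--     ]
--     return "; ".join(list(dict.fromkeys(texts))[:3])
-- ===== Notes on version B (the rewrite author's own statement) =====
-- stated objective: simpler
-- what changed: Replaces the per-item dedupe helper plus nested early-exit loops with one flat comprehension of normalized non-empty strings, a single global order-preserving dedup via dict.fromkeys, and a [:3] slice before joining.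
import Mathlib
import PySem

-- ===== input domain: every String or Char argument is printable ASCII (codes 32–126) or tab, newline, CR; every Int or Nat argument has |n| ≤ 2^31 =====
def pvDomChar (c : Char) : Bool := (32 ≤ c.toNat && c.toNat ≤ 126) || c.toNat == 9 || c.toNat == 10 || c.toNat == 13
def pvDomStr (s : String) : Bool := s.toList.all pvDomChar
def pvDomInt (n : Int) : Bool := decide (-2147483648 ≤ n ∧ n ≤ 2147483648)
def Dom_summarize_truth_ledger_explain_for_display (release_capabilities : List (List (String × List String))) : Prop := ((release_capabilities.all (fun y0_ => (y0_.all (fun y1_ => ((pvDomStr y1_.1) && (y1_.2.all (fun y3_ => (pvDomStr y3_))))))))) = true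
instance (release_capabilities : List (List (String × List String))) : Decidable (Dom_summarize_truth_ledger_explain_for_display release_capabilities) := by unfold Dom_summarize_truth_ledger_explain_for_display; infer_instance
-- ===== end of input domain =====

-- B replaces A's per-item dedupe helper and nested early-exit loops by one flat pass:
-- flatten all normalized non-empty blocker strings, dedup globally once (dict.fromkeys),
-- take the first 3 and join — simpler decomposition, same result.


-- ===== PORT A =====
-- " ".join(str(value).split())  (str(value) is the identity: values are strings)
def pvNorm (s : String) : String := PySem.Str.join " " (PySem.Str.split₀ s)

-- _dedupe_display_text_items; 'for value in values or []' iterates exactly the list 'values'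
-- ('values or []' is the identity on list iteration), so we fold over values directly.
def pvDedupeDisplayTextItems (values : List String) : List String :=
  values.foldl
    (fun deduped value =>
      let normalized := pvNorm value
      if normalized ≠ "" ∧ normalized ∉ deduped then deduped ++ [normalized] else deduped)
    []

-- the inner 'for explanation in …' loop with its continue / early return at length 3
def pvInnerA : List String → List String → List String × Bool
  | [], sample => (sample, false)
  | explanation :: rest, sample =>
    if explanation ∈ sample then pvInnerA rest sample
    else
      let sample' := sample ++ [explanation]
      if 3 ≤ sample'.length then (sample', true) else pvInnerA rest sample'

-- the outer 'for item in release_capabilities' loop; .2 = the early-return flag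
def pvOuterA : List (List (String × List String)) → List String → String
  | [], sample => PySem.Str.join "; " sample
  | item :: rest, sample =>
    let r := pvInnerA
      (pvDedupeDisplayTextItems (PySem.Dict.getD ⟨item⟩ "plain_language_blockers" [])) sample
    if r.2 then PySem.Str.join "; " r.1 else pvOuterA rest r.1

def summarize_truth_ledger_explain_for_display (release_capabilities : List (List (String × List String))) : String :=
  pvOuterA release_capabilities []

-- ===== PORT B =====
def summarize_truth_ledger_explain_for_display_alt (release_capabilities : List (List (String × List String))) : String :=
  let texts := release_capabilities.flatMap (fun item =>
    ((PySem.Dict.getD ⟨item⟩ "plain_language_blockers" []).map pvNorm).filter (fun n => n ≠ ""))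
  PySem.Str.join "; " ((PySem.List.dedup texts).take 3)

-- ===== PRECONDITION & SPEC =====
def Spec_summarize_truth_ledger_explain_for_display (release_capabilities : List (List (String × List String))) (out : String) : Prop := out = summarize_truth_ledger_explain_for_display_alt release_capabilities
instance (release_capabilities : List (List (String × List String))) (out : String) : Decidable (Spec_summarize_truth_ledger_explain_for_display release_capabilities out) := by unfold Spec_summarize_truth_ledger_explain_for_display; infer_instance

-- ===== CLAIM (what is proved, stated in full; the proofs are below) =====
def Claim_equal_summarize_truth_ledger_explain_for_display : Prop := ∀ (release_capabilities : List (List (String × List String))), Dom_summarize_truth_ledger_explain_for_display release_capabilities → Spec_summarize_truth_ledger_explain_for_display release_capabilities (summarize_truth_ledger_explain_for_display release_capabilities)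

-- ===== LEMMAS AND PROOFS =====

-- D acc xs: fold Python's set-style "append if new" step over xs starting from acc
def pvD (acc : List String) (xs : List String) : List String :=
  xs.foldl PySem.Set.add acc

-- the elements D appends beyond acc (D acc xs = acc ++ pvNew acc xs)
def pvNew : List String → List String → List String
  | _, [] => []
  | seen, x :: xs =>
    if seen.contains x then pvNew seen xs else x :: pvNew (seen ++ [x]) xs

theorem pvD_cons (acc : List String) (x : String) (xs : List String) :
    pvD acc (x :: xs) = pvD (PySem.Set.add acc x) xs := rfl

theorem set_add_of_mem {acc : List String} {x : String} (h : x ∈ acc) :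
    PySem.Set.add acc x = acc := by simp [PySem.Set.add, h]

theorem set_add_of_not_mem {acc : List String} {x : String} (h : x ∉ acc) :
    PySem.Set.add acc x = acc ++ [x] := by simp [PySem.Set.add, h]

theorem pvD_eq_append (xs acc : List String) : pvD acc xs = acc ++ pvNew acc xs := by
  induction xs generalizing acc with
  | nil => simp [pvD, pvNew]
  | cons x xs ih =>
    by_cases h : x ∈ acc
    · have hc : acc.contains x = true := by simpa using h
      rw [pvD_cons, set_add_of_mem h, ih]
      simp only [pvNew, hc, reduceIte]
    · have hc : acc.contains x = false := by simpa using h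
      rw [pvD_cons, set_add_of_not_mem h, ih]
      simp only [pvNew, hc, Bool.false_eq_true, reduceIte]
      simp

theorem pvD_absorb (xs : List String) (acc seen : List String)
    (h : ∀ y ∈ seen, y ∈ acc) : pvD acc (pvNew seen xs) = pvD acc xs := by
  induction xs generalizing acc seen with
  | nil => simp [pvNew]
  | cons x xs ih =>
    by_cases hx : x ∈ seen
    · have hc : seen.contains x = true := by simpa using hx
      simp only [pvNew, hc, if_true]
      rw [ih acc seen h, pvD_cons, set_add_of_mem (h x hx)]
    · have hc : seen.contains x = false := by simpa using hx
      simp only [pvNew, hc, Bool.false_eq_true, ite_false]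
      rw [show pvD acc (x :: pvNew (seen ++ [x]) xs) =
            pvD (PySem.Set.add acc x) (pvNew (seen ++ [x]) xs) from rfl,
        pvD_cons]
      exact ih (PySem.Set.add acc x) (seen ++ [x]) (by
        intro y hy
        rcases List.mem_append.1 hy with hy | hy
        · exact (PySem.Set.mem_add acc x y).2 (Or.inl (h y hy))
        · simp only [List.mem_singleton] at hy
          exact (PySem.Set.mem_add acc x y).2 (Or.inr hy))

-- Python's helper = dedup of the normalized non-empty strings (in pvNew form, seen = ∅)
theorem dedupe_eq_pvNew (values : List String) :
    pvDedupeDisplayTextItems values =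
      pvNew [] ((values.map pvNorm).filter (fun n => n ≠ "")) := by
  have key : ∀ (vs acc : List String),
      vs.foldl (fun deduped value =>
        let normalized := pvNorm value
        if normalized ≠ "" ∧ normalized ∉ deduped then deduped ++ [normalized] else deduped) acc
      = pvD acc ((vs.map pvNorm).filter (fun n => n ≠ "")) := by
    intro vs
    induction vs with
    | nil => intro acc; simp [pvD]
    | cons v vs ih =>
      intro acc
      by_cases he : pvNorm v = ""
      · simp only [List.foldl_cons, List.map_cons, List.filter_cons, he]
        simp [ih]
      · by_cases hm : pvNorm v ∈ acc
        · simp only [List.foldl_cons, List.map_cons, List.filter_cons]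
          have hcond : ¬ (pvNorm v ≠ "" ∧ pvNorm v ∉ acc) := by tauto
          rw [if_neg hcond]
          rw [ih]
          simp only [he, ne_eq, not_false_iff, decide_true, if_pos]
          rw [pvD_cons, set_add_of_mem hm]
        · simp only [List.foldl_cons, List.map_cons, List.filter_cons]
          have hcond : (pvNorm v ≠ "" ∧ pvNorm v ∉ acc) := ⟨he, hm⟩
          rw [if_pos hcond]
          rw [ih]
          simp only [he, ne_eq, not_false_iff, decide_true, if_pos]
          rw [pvD_cons, set_add_of_not_mem hm]
  rw [show pvDedupeDisplayTextItems values =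
      values.foldl (fun deduped value =>
        let normalized := pvNorm value
        if normalized ≠ "" ∧ normalized ∉ deduped then deduped ++ [normalized] else deduped) []
    from rfl, key]
  rw [pvD_eq_append]; rfl

-- inner loop characterization: with fewer than 3 collected, it computes (take 3 of D, hit-3 flag)
theorem innerA_char (xs acc : List String) (h : acc.length < 3) :
    pvInnerA xs acc = ((pvD acc xs).take 3, decide (3 ≤ (pvD acc xs).length)) := by
  induction xs generalizing acc with
  | nil =>
    simp only [pvInnerA, pvD, List.foldl_nil]
    rw [List.take_of_length_le (by omega)]
    simp [Nat.not_le.2 h]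
  | cons x xs ih =>
    by_cases hx : x ∈ acc
    · simp only [pvInnerA, hx, if_pos]
      rw [pvD_cons, set_add_of_mem hx]
      exact ih acc h
    · simp only [pvInnerA, hx, ite_false]
      rw [pvD_cons, set_add_of_not_mem hx]
      by_cases h3 : 3 ≤ (acc ++ [x]).length
      · simp only [h3, ite_true]
        have hlen : (acc ++ [x]).length = 3 := by simp at h3 ⊢; omega
        rw [pvD_eq_append]
        rw [show (3 : Nat) = (acc ++ [x]).length from hlen.symm, List.take_left]
        simp
      · simp only [h3, ite_false]
        exact ih (acc ++ [x]) (by simp at h3 ⊢; omega)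

-- per-item flattening used by both sides
def pvItemL (item : List (String × List String)) : List String :=
  ((PySem.Dict.getD ⟨item⟩ "plain_language_blockers" []).map pvNorm).filter (fun n => n ≠ "")

-- outer loop = join of (take 3 of the global dedup fold over the flattened stream)
theorem outerA_char (items : List (List (String × List String))) (acc : List String)
    (h : acc.length < 3) :
    pvOuterA items acc =
      PySem.Str.join "; " ((pvD acc (items.flatMap pvItemL)).take 3) := by
  induction items generalizing acc with
  | nil =>
    simp only [pvOuterA, List.flatMap_nil, pvD, List.foldl_nil]
    rw [List.take_of_length_le (by omega)]
  | cons item rest ih =>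
    have hinner :
        pvInnerA (pvDedupeDisplayTextItems (PySem.Dict.getD ⟨item⟩ "plain_language_blockers" [])) acc
          = ((pvD acc (pvItemL item)).take 3, decide (3 ≤ (pvD acc (pvItemL item)).length)) := by
      rw [dedupe_eq_pvNew, innerA_char _ _ h,
        pvD_absorb _ acc [] (by intro y hy; simp at hy)]
      rfl
    have hflat : pvD acc ((item :: rest).flatMap pvItemL)
        = pvD (pvD acc (pvItemL item)) (rest.flatMap pvItemL) := by
      simp [pvD, List.flatMap_cons, List.foldl_append]
    simp only [pvOuterA, hinner]
    by_cases h3 : 3 ≤ (pvD acc (pvItemL item)).length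
    · rw [if_pos (show decide (3 ≤ (pvD acc (pvItemL item)).length) = true by simpa using h3)]
      rw [hflat, pvD_eq_append (rest.flatMap pvItemL) (pvD acc (pvItemL item)),
        List.take_append_of_le_length h3]
    · rw [if_neg (show ¬ decide (3 ≤ (pvD acc (pvItemL item)).length) = true by simpa using h3)]
      have hlt : (pvD acc (pvItemL item)).length < 3 := by omega
      rw [List.take_of_length_le (by omega), ih _ hlt, hflat]

-- ===== VERDICT (by name: the statement is the Claim_ definition above) =====
theorem summarize_truth_ledger_explain_for_display_spec : Claim_equal_summarize_truth_ledger_explain_for_display := by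
  intro rc _
  show summarize_truth_ledger_explain_for_display rc = summarize_truth_ledger_explain_for_display_alt rc
  rw [show summarize_truth_ledger_explain_for_display rc = pvOuterA rc [] from rfl,
    outerA_char rc [] (by simp)]
  rfl
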